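-- pv_equiv track=rewrite | github.com/Iteksmart/iTechSmart | itechsmart-ninja/backend/app/agents/orchestrator.py | _analyze_task_requirements
-- ===== SOURCE A (Python) =====
-- from typing import Dict, Any, List, Optional
--
-- def _analyze_task_requirements(description: str) -> List[tuple]:
--     """Analyze task to determine required agents"""
--     description_lower = description.lower()
--     agents = []
--
--     # Check for research needs
--     if any(
--         word in description_lower
--         for word in ["research", "find", "search", "information"]
--     ):
--         agents.append(("researcher", "search"))
--
--     # Check for coding needs
--     if any(
--         word in description_lower
--         for word in ["code", "program", "develop", "build", "create"]
--     ):
--         agents.append(("coder", "generate"))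
--
--     # Check for analysis needs
--     if any(
--         word in description_lower
--         for word in ["analyze", "data", "statistics", "metrics"]
--     ):
--         agents.append(("analyst", "analyze"))
--
--     # Check for writing needs
--     if any(
--         word in description_lower
--         for word in ["write", "document", "report", "article"]
--     ):
--         agents.append(("writer", "document"))
--
--     # Check for debugging needs
--     if any(word in description_lower for word in ["debug", "fix", "error", "bug"]):
--         agents.append(("debugger", "analyze"))
--
--     # Default to researcher if no specific needs identified
--     if not agents:
--         agents.append(("researcher", "search"))
--         agents.append(("writer", "document"))
--
--     return agents
-- ===== SOURCE B (Python) =====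
-- def _analyze_task_requirements(description: str) -> list:
--     """Analyze task to determine required agents.
--
--     Single scan of the text: walk the lowered description position by
--     position, checking which keyword group starts at each position
--     (str.startswith with a tuple of prefixes), accumulating one flag per
--     group; the agent list is then assembled from the flags."""
--     dl = description.lower()
--     r = c = a = w = d = False
--     for i in range(len(dl)):
--         r = r or dl.startswith(("research", "find", "search", "information"), i)
--         c = c or dl.startswith(("code", "program", "develop", "build", "create"), i)
--         a = a or dl.startswith(("analyze", "data", "statistics", "metrics"), i)
--         w = w or dl.startswith(("write", "document", "report", "article"), i)
--         d = d or dl.startswith(("debug", "fix", "error", "bug"), i)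
--     agents = [ag for flag, ag in zip(
--         (r, c, a, w, d),
--         [("researcher", "search"), ("coder", "generate"), ("analyst", "analyze"),
--          ("writer", "document"), ("debugger", "analyze")]) if flag]
--     return agents or [("researcher", "search"), ("writer", "document")]
-- ===== Notes on version B (the rewrite author's own statement) =====
-- stated objective: alternative
-- what changed: Instead of five independent whole-text substring-membership tests, B makes a single position-by-position scan of the lowered description, checking at each position which keyword group starts there (startswith with a tuple of prefixes) and accumulating five boolean flags, then assembles the agent list from the flags.
import Mathlib
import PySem

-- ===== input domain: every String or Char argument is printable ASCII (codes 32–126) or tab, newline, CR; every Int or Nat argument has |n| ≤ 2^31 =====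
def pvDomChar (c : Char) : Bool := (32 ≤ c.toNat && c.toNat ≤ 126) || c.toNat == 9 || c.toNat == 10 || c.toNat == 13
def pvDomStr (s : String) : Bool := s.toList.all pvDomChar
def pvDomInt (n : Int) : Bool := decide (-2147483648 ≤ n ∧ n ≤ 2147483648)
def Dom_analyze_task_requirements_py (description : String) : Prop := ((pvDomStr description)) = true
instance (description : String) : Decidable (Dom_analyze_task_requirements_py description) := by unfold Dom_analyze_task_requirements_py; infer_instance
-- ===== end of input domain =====

-- B replaces A's five whole-text substring tests by one position-by-position scan accumulating flags (alternative algorithm, same result).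

-- ===== PORT A =====
-- Literal port of A: five separate if/append branches, then the empty-default branch.
def analyze_task_requirements_py (description : String) : List (String × String) :=
  let description_lower := PySem.Str.lower description
  let agents : List (String × String) := []
  let agents := if ["research", "find", "search", "information"].any
      (fun w => PySem.Str.isIn w description_lower) then agents ++ [("researcher", "search")] else agents
  let agents := if ["code", "program", "develop", "build", "create"].any
      (fun w => PySem.Str.isIn w description_lower) then agents ++ [("coder", "generate")] else agents
  let agents := if ["analyze", "data", "statistics", "metrics"].any
      (fun w => PySem.Str.isIn w description_lower) then agents ++ [("analyst", "analyze")] else agents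
  let agents := if ["write", "document", "report", "article"].any
      (fun w => PySem.Str.isIn w description_lower) then agents ++ [("writer", "document")] else agents
  let agents := if ["debug", "fix", "error", "bug"].any
      (fun w => PySem.Str.isIn w description_lower) then agents ++ [("debugger", "analyze")] else agents
  if agents = [] then agents ++ [("researcher", "search")] ++ [("writer", "document")] else agents

-- ===== PORT B =====
-- Hand-port of Python's dl.startswith((kw, …), i): any of the keywords is a prefix
-- of the suffix starting at position i; exact for 0 ≤ i (the only positions B uses).
def pvStartsAt (grp : List String) (l : List Char) : Bool :=
  grp.any (fun k => k.toList.isPrefixOf l)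

def analyze_task_requirements_py_alt (description : String) : List (String × String) :=
  let dl := (PySem.Str.lower description).toList
  let flags := (List.range dl.length).foldl
    (fun st i =>
      (st.1 || pvStartsAt ["research", "find", "search", "information"] (dl.drop i),
       st.2.1 || pvStartsAt ["code", "program", "develop", "build", "create"] (dl.drop i),
       st.2.2.1 || pvStartsAt ["analyze", "data", "statistics", "metrics"] (dl.drop i),
       st.2.2.2.1 || pvStartsAt ["write", "document", "report", "article"] (dl.drop i),
       st.2.2.2.2 || pvStartsAt ["debug", "fix", "error", "bug"] (dl.drop i)))
    (false, false, false, false, false)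
  let agents := (List.zip [flags.1, flags.2.1, flags.2.2.1, flags.2.2.2.1, flags.2.2.2.2]
      [("researcher", "search"), ("coder", "generate"), ("analyst", "analyze"),
       ("writer", "document"), ("debugger", "analyze")]).filterMap
    (fun fa => if fa.1 then some fa.2 else none)
  if agents = [] then [("researcher", "search"), ("writer", "document")] else agents

-- ===== PRECONDITION & SPEC =====
def Spec_analyze_task_requirements_py (description : String) (out : List (String × String)) : Prop := out = analyze_task_requirements_py_alt description
instance (description : String) (out : List (String × String)) : Decidable (Spec_analyze_task_requirements_py description out) := by unfold Spec_analyze_task_requirements_py; infer_instance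

-- ===== CLAIM (what is proved, stated in full; the proofs are below) =====
def Claim_equal_analyze_task_requirements_py : Prop := ∀ (description : String), Dom_analyze_task_requirements_py description → Spec_analyze_task_requirements_py description (analyze_task_requirements_py description)

-- ===== LEMMAS AND PROOFS =====

-- The five-flag fold splits into five independent any-folds.
theorem pvFoldlFlags {γ : Type} (p1 p2 p3 p4 p5 : γ → Bool) :
    ∀ (l : List γ) (a b c d e : Bool),
      l.foldl (fun st i =>
          (st.1 || p1 i, st.2.1 || p2 i, st.2.2.1 || p3 i,
           st.2.2.2.1 || p4 i, st.2.2.2.2 || p5 i)) (a, b, c, d, e)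
        = (a || l.any p1, b || l.any p2, c || l.any p3, d || l.any p4, e || l.any p5)
  | [], a, b, c, d, e => by simp
  | x :: xs, a, b, c, d, e => by
      simp only [List.foldl_cons, List.any_cons]
      rw [pvFoldlFlags p1 p2 p3 p4 p5 xs]
      simp [Bool.or_assoc]

-- Scanning all positions for a prefix match equals a substring-membership test,
-- provided no keyword in the group is empty.
theorem pvScan_eq_any_isIn (grp : List String) (s : String)
    (hne : ∀ w ∈ grp, w.toList ≠ []) :
    (List.range s.toList.length).any (fun i => pvStartsAt grp (s.toList.drop i))
      = grp.any (fun w => PySem.Str.isIn w s) := by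
  rw [Bool.eq_iff_iff]
  simp only [List.any_eq_true, pvStartsAt, List.mem_range, List.isPrefixOf_iff_prefix]
  constructor
  · rintro ⟨i, _, w, hw, hp⟩
    exact ⟨w, hw, (PySem.Str.isIn_iff_infix _ _).mpr
      ((PySem.Chars.isIn_iff_infix _ _).mp ((PySem.Chars.exists_prefix_drop_iff_isIn _ _).mp ⟨i, hp⟩))⟩
  · rintro ⟨w, hw, hin⟩
    obtain ⟨j, hp⟩ := (PySem.Chars.exists_prefix_drop_iff_isIn _ _).mpr
      ((PySem.Chars.isIn_iff_infix _ _).mpr ((PySem.Str.isIn_iff_infix _ _).mp hin))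
    by_cases hj : j < s.toList.length
    · exact ⟨j, hj, w, hw, hp⟩
    · exfalso
      have : s.toList.drop j = [] := List.drop_eq_nil_of_le (le_of_not_gt hj)
      rw [this, List.prefix_nil] at hp
      exact hne w hw hp

-- ===== VERDICT (by name: the statement is the Claim_ definition above) =====
set_option maxHeartbeats 1000000 in
theorem analyze_task_requirements_py_spec : Claim_equal_analyze_task_requirements_py := by
  intro d _
  unfold Spec_analyze_task_requirements_py
  simp only [analyze_task_requirements_py, analyze_task_requirements_py_alt, pvFoldlFlags,
    Bool.false_or]
  rw [pvScan_eq_any_isIn _ _ (by decide), pvScan_eq_any_isIn _ _ (by decide),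
      pvScan_eq_any_isIn _ _ (by decide), pvScan_eq_any_isIn _ _ (by decide),
      pvScan_eq_any_isIn _ _ (by decide)]
  cases h1 : ["research", "find", "search", "information"].any (fun w => PySem.Str.isIn w (PySem.Str.lower d)) <;>
  cases h2 : ["code", "program", "develop", "build", "create"].any (fun w => PySem.Str.isIn w (PySem.Str.lower d)) <;>
  cases h3 : ["analyze", "data", "statistics", "metrics"].any (fun w => PySem.Str.isIn w (PySem.Str.lower d)) <;>
  cases h4 : ["write", "document", "report", "article"].any (fun w => PySem.Str.isIn w (PySem.Str.lower d)) <;>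
  cases h5 : ["debug", "fix", "error", "bug"].any (fun w => PySem.Str.isIn w (PySem.Str.lower d)) <;>
  decide
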